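-- pv_equiv track=rewrite | github.com/graalvm/mx | mx_ide_intellij.py | intellij_get_ruby_sdk_name
-- ===== SOURCE A (Python) =====
-- intellij_ruby_sdk_type = 'RUBY_SDK'
--
-- def intellij_get_ruby_sdk_name(sdks):
--     for sdk in sdks.values():
--         if sdk['type'] == intellij_ruby_sdk_type and 'truffleruby-jvm' in sdk['name']:
--             return sdk['name']
--     for sdk in sdks.values():
--         if sdk['type'] == intellij_ruby_sdk_type:
--             return sdk['name']
--     return "truffleruby"
-- ===== SOURCE B (Python) =====
-- intellij_ruby_sdk_type = 'RUBY_SDK'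
--
-- def intellij_get_ruby_sdk_name(sdks):
--     fallback = None
--     for sdk in sdks.values():
--         if sdk['type'] == intellij_ruby_sdk_type:
--             name = sdk['name']
--             if 'truffleruby-jvm' in name:
--                 return name
--             if fallback is None:
--                 fallback = name
--     return fallback if fallback is not None else "truffleruby"
-- ===== Notes on version B (the rewrite author's own statement) =====
-- stated objective: simpler
-- what changed: Replaced A's two sequential scans over sdks.values() with a single pass that returns the first truffleruby-jvm RUBY_SDK immediately and tracks the first RUBY_SDK name as a fallback.
import Mathlib
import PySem

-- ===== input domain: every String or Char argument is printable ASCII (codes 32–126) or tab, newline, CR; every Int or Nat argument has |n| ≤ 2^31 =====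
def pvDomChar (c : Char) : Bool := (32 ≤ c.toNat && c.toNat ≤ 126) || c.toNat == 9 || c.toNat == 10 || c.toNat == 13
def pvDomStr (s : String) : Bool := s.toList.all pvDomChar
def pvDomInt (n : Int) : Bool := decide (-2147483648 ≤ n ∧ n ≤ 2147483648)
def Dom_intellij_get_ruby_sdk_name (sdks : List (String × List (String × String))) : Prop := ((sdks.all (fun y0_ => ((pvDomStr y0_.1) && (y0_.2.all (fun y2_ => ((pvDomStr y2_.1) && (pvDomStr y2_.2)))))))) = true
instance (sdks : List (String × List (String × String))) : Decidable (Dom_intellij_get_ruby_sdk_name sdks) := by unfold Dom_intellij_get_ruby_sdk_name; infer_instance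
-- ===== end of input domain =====

-- One honest line: B merges A's two scans into a single pass that returns the first
-- 'truffleruby-jvm' RUBY_SDK immediately and keeps the first RUBY_SDK name as a fallback (simpler).

-- ===== PORT A =====
-- first loop: first RUBY_SDK whose name contains 'truffleruby-jvm' (KeyError on missing keys is excluded by Pre_)
def pvA_loop1 : List (List (String × String)) → Option String
  | [] => none
  | d :: rest =>
    if (PySem.Dict.mk d).getD "type" "" = "RUBY_SDK" ∧ PySem.Str.isIn "truffleruby-jvm" ((PySem.Dict.mk d).getD "name" "") then
      some ((PySem.Dict.mk d).getD "name" "")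
    else pvA_loop1 rest

-- second loop: first RUBY_SDK at all
def pvA_loop2 : List (List (String × String)) → Option String
  | [] => none
  | d :: rest =>
    if (PySem.Dict.mk d).getD "type" "" = "RUBY_SDK" then some ((PySem.Dict.mk d).getD "name" "")
    else pvA_loop2 rest

def intellij_get_ruby_sdk_name (sdks : List (String × List (String × String))) : String :=
  match pvA_loop1 (sdks.map (·.2)) with
  | some n => n
  | none =>
    match pvA_loop2 (sdks.map (·.2)) with
    | some n => n
    | none => "truffleruby"

-- ===== PORT B =====
-- single pass carrying the fallback (first RUBY_SDK name seen, never overwritten)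
def pvB_loop : List (List (String × String)) → Option String → String
  | [], fallback => fallback.getD "truffleruby"
  | d :: rest, fallback =>
    if (PySem.Dict.mk d).getD "type" "" = "RUBY_SDK" then
      if PySem.Str.isIn "truffleruby-jvm" ((PySem.Dict.mk d).getD "name" "") then
        (PySem.Dict.mk d).getD "name" ""
      else pvB_loop rest (if fallback.isNone then some ((PySem.Dict.mk d).getD "name" "") else fallback)
    else pvB_loop rest fallback

def intellij_get_ruby_sdk_name_alt (sdks : List (String × List (String × String))) : String :=
  pvB_loop (sdks.map (·.2)) none

-- ===== PRECONDITION & SPEC =====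
-- Pre_ excludes exactly the inputs where Python A raises KeyError: an sdk dict without a
-- 'type' key, or a RUBY_SDK dict without a 'name' key.
def Pre_intellij_get_ruby_sdk_name (sdks : List (String × List (String × String))) : Prop :=
  (sdks.all (fun p =>
    (PySem.Dict.mk p.2).contains "type" &&
    (decide ((PySem.Dict.mk p.2).getD "type" "" = "RUBY_SDK") → (PySem.Dict.mk p.2).contains "name"))) = true
instance (sdks : List (String × List (String × String))) : Decidable (Pre_intellij_get_ruby_sdk_name sdks) := by unfold Pre_intellij_get_ruby_sdk_name; infer_instance

def pvWitness_intellij_get_ruby_sdk_name : (List (String × List (String × String))) :=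
  [("a", [("type", "RUBY_SDK"), ("name", "truffleruby-jvm-ce")]), ("b", [("type", "JDK")])]

def Spec_intellij_get_ruby_sdk_name (sdks : List (String × List (String × String))) (out : String) : Prop := out = intellij_get_ruby_sdk_name_alt sdks
instance (sdks : List (String × List (String × String))) (out : String) : Decidable (Spec_intellij_get_ruby_sdk_name sdks out) := by unfold Spec_intellij_get_ruby_sdk_name; infer_instance

-- ===== CLAIM (what is proved, stated in full; the proofs are below) =====
def Claim_equal_intellij_get_ruby_sdk_name : Prop := ∀ (sdks : List (String × List (String × String))), Dom_intellij_get_ruby_sdk_name sdks → Pre_intellij_get_ruby_sdk_name sdks → Spec_intellij_get_ruby_sdk_name sdks (intellij_get_ruby_sdk_name sdks)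

-- ===== LEMMAS AND PROOFS =====

-- If the first scan hits, B returns that name no matter what fallback it carries.
theorem pvB_of_loop1_some (l : List (List (String × String))) (n : String)
    (h : pvA_loop1 l = some n) : ∀ fb, pvB_loop l fb = n := by
  induction l with
  | nil => simp [pvA_loop1] at h
  | cons d rest ih =>
    intro fb
    simp only [pvA_loop1] at h
    by_cases ht : (PySem.Dict.mk d).getD "type" "" = "RUBY_SDK"
    · by_cases hjvm : PySem.Str.isIn "truffleruby-jvm" ((PySem.Dict.mk d).getD "name" "") = true
      · rw [if_pos ⟨ht, hjvm⟩] at h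
        simp only [pvB_loop]
        rw [if_pos ht, if_pos hjvm]
        exact Option.some.inj h
      · rw [if_neg (fun hc => hjvm hc.2)] at h
        simp only [pvB_loop]
        rw [if_pos ht, if_neg hjvm]
        exact ih h _
    · rw [if_neg (fun hc => ht hc.1)] at h
      simp only [pvB_loop]
      rw [if_neg ht]
      exact ih h _

-- If the first scan misses, B returns the fallback-or-second-scan result.
theorem pvB_of_loop1_none (l : List (List (String × String)))
    (h : pvA_loop1 l = none) : ∀ fb : Option String,
    pvB_loop l fb = ((fb.or (pvA_loop2 l)).getD "truffleruby") := by
  induction l with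
  | nil => intro fb; cases fb <;> simp [pvB_loop, pvA_loop2]
  | cons d rest ih =>
    intro fb
    simp only [pvA_loop1] at h
    by_cases ht : (PySem.Dict.mk d).getD "type" "" = "RUBY_SDK"
    · by_cases hjvm : PySem.Str.isIn "truffleruby-jvm" ((PySem.Dict.mk d).getD "name" "") = true
      · rw [if_pos ⟨ht, hjvm⟩] at h; exact absurd h (by simp)
      · rw [if_neg (fun hc => hjvm hc.2)] at h
        simp only [pvB_loop, pvA_loop2]
        rw [if_pos ht, if_neg hjvm, if_pos ht, ih h]
        cases fb <;> simp
    · rw [if_neg (fun hc => ht hc.1)] at h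
      simp only [pvB_loop, pvA_loop2]
      rw [if_neg ht, if_neg ht, ih h]

-- ===== VERDICT (by name: the statement is the Claim_ definition above) =====
theorem intellij_get_ruby_sdk_name_spec : Claim_equal_intellij_get_ruby_sdk_name := by
  intro sdks _ _
  unfold Spec_intellij_get_ruby_sdk_name intellij_get_ruby_sdk_name intellij_get_ruby_sdk_name_alt
  cases h : pvA_loop1 (sdks.map (·.2)) with
  | some n => rw [pvB_of_loop1_some _ _ h none]
  | none =>
    rw [pvB_of_loop1_none _ h none]
    cases h2 : pvA_loop2 (sdks.map (·.2)) <;> simp
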